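-- pv_equiv track=rewrite | github.com/yujie2016/MF-TDMA20201022 | MF_modulation.py | tto
-- ===== SOURCE A (Python) =====
-- def tto(I, Q):
--     data1 = []
--     data = []
--     for i in range(len(I)):
--         data.append(I[i])
--         data.append(Q[i])
--     for j in range(len(data)):
--         data1.append(int((data[j]+1)/2))
--     return data1
-- ===== SOURCE B (Python) =====
-- def tto(I, Q):
--     n = len(I)
--     out = [0] * (2 * n)
--     out[0::2] = [int((x + 1) / 2) for x in I]
--     out[1::2] = [int((y + 1) / 2) for y in Q[:n]]
--     return out
-- ===== Notes on version B (the rewrite author's own statement) =====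
-- stated objective: alternative
-- what changed: Instead of building an interleaved list element-by-element and then mapping it, B maps I and Q[:len(I)] separately with comprehensions and writes the two mapped lists into the even and odd positions of a preallocated result via strided slice assignment.
import Mathlib
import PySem

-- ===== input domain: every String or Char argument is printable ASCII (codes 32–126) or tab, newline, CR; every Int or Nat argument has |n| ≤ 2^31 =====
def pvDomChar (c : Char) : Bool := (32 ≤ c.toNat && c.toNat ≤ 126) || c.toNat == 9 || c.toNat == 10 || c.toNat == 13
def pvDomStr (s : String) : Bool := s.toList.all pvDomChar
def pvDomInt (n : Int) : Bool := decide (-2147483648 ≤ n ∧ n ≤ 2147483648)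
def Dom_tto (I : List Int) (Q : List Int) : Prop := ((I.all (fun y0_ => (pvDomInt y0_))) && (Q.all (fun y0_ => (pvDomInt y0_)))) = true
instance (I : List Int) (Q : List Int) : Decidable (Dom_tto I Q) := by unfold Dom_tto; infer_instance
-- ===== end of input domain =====

-- B maps I and Q[:len(I)] separately and writes the results into the even/odd slots of the
-- output (in Python via strided slice assignment), instead of A's build-interleaved-then-map;
-- same cost, different decomposition. int((x+1)/2) on Dom's ints is exact float division
-- truncated toward zero = Int.tdiv (x+1) 2.

-- ===== PORT A =====
def tto (I : List Int) (Q : List Int) : List Int :=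
  -- data1 = []; data = []
  -- for i in range(len(I)): data.append(I[i]); data.append(Q[i])
  let data : List Int :=
    (PySem.List.pyRange 0 (I.length : Int) 1).foldl
      (fun d i => (d ++ [PySem.List.pyGetD I i 0]) ++ [PySem.List.pyGetD Q i 0]) []
  -- for j in range(len(data)): data1.append(int((data[j]+1)/2))
  (PySem.List.pyRange 0 (data.length : Int) 1).foldl
    (fun d1 j => d1 ++ [Int.tdiv (PySem.List.pyGetD data j 0 + 1) 2]) []

-- ===== PORT B =====
-- exact effect of Source B's two strided slice assignments out[0::2] = mi; out[1::2] = mq on the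
-- preallocated [0]*(2n) list when len(mi) = len(mq) = n: mi and mq interleaved
def pvEvenOdd : List Int → List Int → List Int
  | x :: xs, y :: ys => x :: y :: pvEvenOdd xs ys
  | _, _ => []

def tto_alt (I : List Int) (Q : List Int) : List Int :=
  let mi := I.map (fun x => Int.tdiv (x + 1) 2)
  let mq := (PySem.List.slice Q none (some (I.length : Int))).map (fun y => Int.tdiv (y + 1) 2)
  pvEvenOdd mi mq

-- ===== PRECONDITION & SPEC =====
-- A evaluates Q[i] for every i < len(I), raising IndexError when len(Q) < len(I)
-- (B's slice assignment raises ValueError there); Pre_ excludes exactly that.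
def Pre_tto (I : List Int) (Q : List Int) : Prop := I.length ≤ Q.length
instance (I : List Int) (Q : List Int) : Decidable (Pre_tto I Q) := by unfold Pre_tto; infer_instance
def pvWitness_tto : List Int × List Int := ([-4, 3], [5, -1])
def Spec_tto (I : List Int) (Q : List Int) (out : List Int) : Prop := out = tto_alt I Q
instance (I : List Int) (Q : List Int) (out : List Int) : Decidable (Spec_tto I Q out) := by unfold Spec_tto; infer_instance

-- ===== CLAIM (what is proved, stated in full; the proofs are below) =====
def Claim_equal_tto : Prop := ∀ (I : List Int) (Q : List Int), Dom_tto I Q → Pre_tto I Q → Spec_tto I Q (tto I Q)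

-- ===== LEMMAS AND PROOFS =====

-- a foldl that appends a fixed two-element block per index is a flatMap
theorem pv_foldl_two (g h : Int → Int) (xs : List Int) (acc : List Int) :
    xs.foldl (fun d i => (d ++ [g i]) ++ [h i]) acc
    = acc ++ xs.flatMap (fun i => [g i, h i]) := by
  have : (fun (d : List Int) i => (d ++ [g i]) ++ [h i])
       = (fun d i => d ++ [g i, h i]) := by
    funext d i; simp
  rw [this, PySem.List.foldl_append_eq_flatMap]

-- the mapping pass: appending one value per element is a map
theorem pv_foldl_one (f : Int → Int) (xs : List Int) (acc : List Int) :
    xs.foldl (fun d v => d ++ [f v]) acc = acc ++ xs.map f := by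
  rw [PySem.List.foldl_append_eq_flatMap]
  congr 1
  induction xs with
  | nil => rfl
  | cons x xs ih => simp [ih]

-- A's interleaving pass, read index-wise over List.range, equals the interleaving of the two maps
theorem pv_range_flatMap_eq (f : Int → Int) :
    ∀ (I Q : List Int), I.length ≤ Q.length →
      (List.range I.length).flatMap (fun k => [f (I.getD k 0), f (Q.getD k 0)])
      = pvEvenOdd (I.map f) ((Q.take I.length).map f) := by
  intro I
  induction I with
  | nil => intro Q _; simp [pvEvenOdd]
  | cons x xs ih =>
    intro Q hQ
    cases Q with
    | nil => simp at hQ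
    | cons y ys =>
      simp only [List.length_cons, List.range_succ_eq_map, List.flatMap_cons, List.flatMap_map]
      have hlen : xs.length ≤ ys.length := by simpa using hQ
      have hrec := ih ys hlen
      simp only [List.getD_eq_getElem?_getD] at hrec
      simp [pvEvenOdd, hrec, List.map_take]

-- ===== VERDICT (by name: the statement is the Claim_ definition above) =====
theorem tto_spec : Claim_equal_tto := by
  intro I Q _ hpre
  unfold Spec_tto tto tto_alt
  rw [pv_foldl_two (fun i => PySem.List.pyGetD I i 0) (fun i => PySem.List.pyGetD Q i 0)]
  rw [PySem.List.foldl_pyRange_zero_pyGetD' _ 0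
        (fun (d1 : List Int) (v : Int) => d1 ++ [Int.tdiv (v + 1) 2]) []]
  rw [pv_foldl_one (fun v => Int.tdiv (v + 1) 2)]
  simp only [List.nil_append, List.map_flatMap]
  rw [PySem.List.pyRange_one] at *
  simp only [List.flatMap_map]
  have h0 : ((I.length : Int) - 0).toNat = I.length := by omega
  rw [h0]
  have hb : PySem.List.slice Q none (some (I.length : Int)) = Q.take I.length :=
    PySem.List.slice_to_natCast Q I.length
  rw [hb]
  rw [← pv_range_flatMap_eq (fun v => Int.tdiv (v + 1) 2) I Q hpre]
  congr 1
  funext k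
  simp
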